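-- pv_equiv track=rewrite | github.com/arpitsingh39/TechMaharajas | TechMaharajas-main/routes/availability.py | _normalize_week
-- ===== SOURCE A (Python) =====
-- from typing import Dict, List
--
-- WEEKDAYS = ("monday","tuesday","wednesday","thursday","friday","saturday","sunday")
--
-- def _normalize_week(week: Dict[str, List[str]]) -> Dict[str, List[str]]:
--     """Lowercase weekday keys, ensure all weekdays exist (missing -> empty list), and strip whitespace."""
--     out: Dict[str, List[str]] = {d: [] for d in WEEKDAYS}
--     for k, v in (week or {}).items():
--         if not isinstance(k, str):
--             continue
--         key = k.strip().lower()
--         if key in out and isinstance(v, list):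
--             cleaned = [str(x).strip() for x in v if isinstance(x, str)]
--             out[key] = cleaned
--     return out
-- ===== SOURCE B (Python) =====
-- WEEKDAYS = ("monday","tuesday","wednesday","thursday","friday","saturday","sunday")
--
-- def _normalize_week(week):
--     """Dict-free: for each weekday, search the entries in reverse for the last
--     valid occurrence of that day (last-wins) and clean it; missing -> []."""
--     items = list((week or {}).items())
--     def last_cleaned(day):
--         for k, v in reversed(items):
--             if isinstance(k, str) and isinstance(v, list) and k.strip().lower() == day:
--                 return [str(x).strip() for x in v if isinstance(x, str)]
--         return []
--     return {d: last_cleaned(d) for d in WEEKDAYS}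
-- ===== Notes on version B (the rewrite author's own statement) =====
-- stated objective: alternative
-- what changed: B builds no dict at all: for each of the seven fixed weekdays it scans the input entries in reverse and returns the cleaned value of the first (= Python's last-winning) matching entry, instead of A's pre-seeded dict overwritten in place during a single forward pass.
import Mathlib
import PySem

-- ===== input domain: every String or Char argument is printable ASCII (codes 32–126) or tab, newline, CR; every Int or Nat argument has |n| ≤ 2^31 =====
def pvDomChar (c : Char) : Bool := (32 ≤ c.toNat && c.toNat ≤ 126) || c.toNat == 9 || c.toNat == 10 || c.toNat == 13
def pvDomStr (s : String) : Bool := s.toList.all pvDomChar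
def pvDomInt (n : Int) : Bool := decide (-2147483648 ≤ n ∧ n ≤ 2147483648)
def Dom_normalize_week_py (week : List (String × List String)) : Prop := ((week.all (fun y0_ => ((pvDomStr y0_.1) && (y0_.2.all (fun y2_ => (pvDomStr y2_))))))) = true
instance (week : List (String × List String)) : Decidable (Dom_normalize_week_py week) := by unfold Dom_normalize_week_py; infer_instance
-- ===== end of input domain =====

-- B is dict-free: per fixed weekday it takes the last matching entry by a reverse scan,
-- instead of A's pre-seeded dict overwritten in a forward pass (objective: alternative).

-- ===== PORT A =====
def pvWEEKDAYS : List String :=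
  ["monday", "tuesday", "wednesday", "thursday", "friday", "saturday", "sunday"]

-- k.strip().lower()
def pvNorm (k : String) : String := PySem.Str.lower (PySem.Str.strip k)

-- [str(x).strip() for x in v if isinstance(x, str)]  (x is a str by typing, str(x) = x)
def pvClean (v : List String) : List String := v.map PySem.Str.strip

-- one iteration of A's loop body (k is a str by typing, so the isinstance-continue never fires)
def pvAStep (out : PySem.Dict String (List String)) (kv : String × List String) :
    PySem.Dict String (List String) :=
  let key := pvNorm kv.1
  if out.contains key then out.insert key (pvClean kv.2) else out

def normalize_week_py (week : List (String × List String)) : List (String × List String) :=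
  let out0 : PySem.Dict String (List String) :=
    pvWEEKDAYS.foldl (fun d w => d.insert w []) PySem.Dict.empty   -- {d: [] for d in WEEKDAYS}
  (week.foldl pvAStep out0).items

-- ===== PORT B =====
-- B's inner loop: first entry of the reversed items whose normalized key is `day`
-- (the isinstance guards are true by typing), cleaned; else [].
def pvLastCleaned (items : List (String × List String)) (day : String) : List String :=
  match (items.reverse.find? (fun kv => pvNorm kv.1 == day)) with
  | some kv => pvClean kv.2
  | none => []

def normalize_week_py_alt (week : List (String × List String)) : List (String × List String) :=
  pvWEEKDAYS.map (fun d => (d, pvLastCleaned week d))   -- {d: last_cleaned(d) for d in WEEKDAYS}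

-- ===== PRECONDITION & SPEC =====
def Spec_normalize_week_py (week : List (String × List String)) (out : List (String × List String)) : Prop := out = normalize_week_py_alt week
instance (week : List (String × List String)) (out : List (String × List String)) : Decidable (Spec_normalize_week_py week out) := by unfold Spec_normalize_week_py; infer_instance

-- ===== CLAIM (what is proved, stated in full; the proofs are below) =====
def Claim_equal_normalize_week_py : Prop := ∀ (week : List (String × List String)), Dom_normalize_week_py week → Spec_normalize_week_py week (normalize_week_py week)

-- ===== LEMMAS AND PROOFS =====

-- A's loop keeps the dict in the shape "WEEKDAYS, each with a value"; the final value at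
-- day w is the cleaned last matching entry of l (found by B's reversed scan), else f w.
theorem pvA_shape (l : List (String × List String)) (f : String → List String) :
    (l.foldl pvAStep (PySem.Dict.mk (pvWEEKDAYS.map (fun w => (w, f w))))).items
      = pvWEEKDAYS.map
          (fun w => (w, match (l.reverse.find? (fun kv => pvNorm kv.1 == w)) with
                        | some kv => pvClean kv.2
                        | none => f w)) := by
  induction l generalizing f with
  | nil => simp
  | cons kv l ih =>
    have hkeys : (PySem.Dict.mk (pvWEEKDAYS.map (fun w => (w, f w)))).keys = pvWEEKDAYS := by
      simp [PySem.Dict.keys_mk, Function.comp_def]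
    simp only [List.foldl_cons, List.reverse_cons]
    by_cases hmem : pvNorm kv.1 ∈ pvWEEKDAYS
    · have hcont : (PySem.Dict.mk (pvWEEKDAYS.map (fun w => (w, f w)))).contains (pvNorm kv.1) = true := by
        rw [PySem.Dict.contains_eq_decide_mem_keys, hkeys]; simpa using hmem
      have hins :
          (PySem.Dict.mk (pvWEEKDAYS.map (fun w => (w, f w)))).insert (pvNorm kv.1) (pvClean kv.2)
            = PySem.Dict.mk (pvWEEKDAYS.map
                (fun w => (w, if w = pvNorm kv.1 then pvClean kv.2 else f w))) := by
        apply PySem.Dict.ext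
        rw [PySem.Dict.items_insert_of_contains _ _ hcont]
        simp only [List.map_map]
        apply List.map_congr_left
        intro w _
        by_cases hw : w = pvNorm kv.1 <;> simp [hw]
      rw [show pvAStep (PySem.Dict.mk (pvWEEKDAYS.map (fun w => (w, f w)))) kv
            = PySem.Dict.mk (pvWEEKDAYS.map
                (fun w => (w, if w = pvNorm kv.1 then pvClean kv.2 else f w))) by
          simp only [pvAStep, hcont, if_pos]; exact hins]
      rw [ih]
      apply List.map_congr_left
      intro w _
      rw [List.find?_append]
      cases hg : (l.reverse.find? (fun kv => pvNorm kv.1 == w)) with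
      | some u => simp
      | none =>
        by_cases hw : w = pvNorm kv.1
        · simp [List.find?, hw]
        · have hb : (pvNorm kv.1 == w) = false :=
            beq_eq_false_iff_ne.mpr (fun h => hw h.symm)
          simp [List.find?, hb]
          exact fun h => absurd h hw
    · have hcont : (PySem.Dict.mk (pvWEEKDAYS.map (fun w => (w, f w)))).contains (pvNorm kv.1) = false := by
        rw [PySem.Dict.contains_eq_decide_mem_keys, hkeys]; simpa using hmem
      rw [show pvAStep (PySem.Dict.mk (pvWEEKDAYS.map (fun w => (w, f w)))) kv
            = PySem.Dict.mk (pvWEEKDAYS.map (fun w => (w, f w))) by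
          simp [pvAStep, hcont]]
      rw [ih]
      apply List.map_congr_left
      intro w hw
      rw [List.find?_append]
      have hne : pvNorm kv.1 ≠ w := fun h => hmem (h ▸ hw)
      cases hg : (l.reverse.find? (fun kv => pvNorm kv.1 == w)) with
      | some u => simp
      | none =>
        have hb : (pvNorm kv.1 == w) = false := beq_eq_false_iff_ne.mpr hne
        simp [List.find?, hb]

-- ===== VERDICT (by name: the statement is the Claim_ definition above) =====
theorem normalize_week_py_spec : Claim_equal_normalize_week_py := by
  intro week _
  show normalize_week_py week = normalize_week_py_alt week
  unfold normalize_week_py normalize_week_py_alt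
  have h0 : (pvWEEKDAYS.foldl (fun d w => d.insert w []) PySem.Dict.empty
      : PySem.Dict String (List String))
      = PySem.Dict.mk (pvWEEKDAYS.map (fun w => (w, ([] : List String)))) := by rfl
  rw [h0, pvA_shape]
  rfl
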